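-- pv_equiv track=rewrite | github.com/pkauppin/ocr-postcorr | train/pairs2features.py | get_feats
-- ===== SOURCE A (Python) =====
-- eps = '@_EPSILON_SYMBOL_@'
--
-- feat_specs = {
--     (1, 0, 0), # _
--     (1, 1, 0), # x _
--     (1, 1, 1), # x _ y
--     (1, 1, 2), # x _ y z
--     #(1, 2, 1), # x y _ z
--     #(1, 0, 1), # _ x
--     }
--
-- def get_feats(pairs):
--     feats = []
--     for i in range(1, len(pairs)-1):
--         for (s, lenL, lenR) in feat_specs:
--             sub = pairs[i]
--             xL = [ pair for pair in pairs[:i] if pair[0] != eps ]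
--             xR = [ pair for pair in pairs[i+1:] if pair[0] != eps ]
--             if len(xL) >= lenL and len(xR) >= lenR:
--                 cxL = tuple( pair[0] for pair in xL[-lenL:] )
--                 cxR = tuple( pair[0] for pair in xR[:lenR] )
--                 if lenL == 0:
--                     cxL = tuple()
--                 if lenR == 0:
--                     cxR = tuple()
--                 feat = (sub, cxL, cxR,)
--                 feats.append(feat)
--     return feats
-- ===== SOURCE B (Python) =====
-- eps = '@_EPSILON_SYMBOL_@'
--
-- # feature specs in the (deterministic) iteration order of A's set literal
-- _SPECS = [(1, 0, 0), (1, 1, 0), (1, 1, 1), (1, 1, 2)]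
--
-- def get_feats(pairs):
--     # One pass: precompute the non-eps first components once and keep a running
--     # prefix count, so each position's left/right context is an O(1) slice.
--     n = len(pairs)
--     firsts = [p[0] for p in pairs if p[0] != eps]
--     total = len(firsts)
--     feats = []
--     L = 0
--     for i, pair in enumerate(pairs):
--         mid = L + (pair[0] != eps)
--         if 1 <= i <= n - 2:
--             for (s, lenL, lenR) in _SPECS:
--                 if L >= lenL and total - mid >= lenR:
--                     feats.append((pair, tuple(firsts[L - lenL:L]),
--                                   tuple(firsts[mid:mid + lenR])))
--         L = mid
--     return feats
-- ===== Notes on version B (the rewrite author's own statement) =====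
-- stated objective: faster
-- what changed: Instead of re-filtering the whole pair list (four times per position) to rebuild the left/right non-eps contexts, B precomputes the non-eps first components once and walks the list a single time with a running prefix count, so each context is an O(1)-bounded slice of the precomputed list.
import Mathlib
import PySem

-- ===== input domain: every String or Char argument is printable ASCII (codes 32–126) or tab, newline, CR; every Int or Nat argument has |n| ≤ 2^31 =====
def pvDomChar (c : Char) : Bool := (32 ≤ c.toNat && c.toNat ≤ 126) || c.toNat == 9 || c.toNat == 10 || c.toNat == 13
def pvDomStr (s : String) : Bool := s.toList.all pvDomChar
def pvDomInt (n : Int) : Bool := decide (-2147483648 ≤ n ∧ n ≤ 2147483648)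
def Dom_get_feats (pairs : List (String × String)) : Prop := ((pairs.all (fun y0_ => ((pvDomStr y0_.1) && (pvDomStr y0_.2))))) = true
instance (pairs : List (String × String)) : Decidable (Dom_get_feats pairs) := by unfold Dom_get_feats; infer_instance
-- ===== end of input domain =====

-- B replaces A's per-position re-filtering of the whole list by one precomputed
-- non-eps list plus a running prefix count (objective: faster, O(n^2) → O(n)).

-- ===== PORT A =====
def epsStr : String := "@_EPSILON_SYMBOL_@"

-- A iterates over the set literal feat_specs; its CPython iteration order is deterministic
-- for these int tuples and is the one recorded here.
def featSpecsList : List (Int × Int × Int) := [(1, 0, 0), (1, 1, 0), (1, 1, 1), (1, 1, 2)]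

-- body of A's inner 'for (s, lenL, lenR) in feat_specs' loop
def specStepA (pairs : List (String × String)) (i : Int)
    (feats : List ((String × String) × List String × List String))
    (spec : Int × Int × Int) : List ((String × String) × List String × List String) :=
  let sub := PySem.List.pyGetD pairs i ("", "")
  let xL := (PySem.List.slice pairs none (some i)).filter (fun p => p.1 != epsStr)
  let xR := (PySem.List.slice pairs (some (i + 1)) none).filter (fun p => p.1 != epsStr)
  if (xL.length : Int) ≥ spec.2.1 ∧ (xR.length : Int) ≥ spec.2.2 then
    let cxL := (PySem.List.slice xL (some (-spec.2.1)) none).map Prod.fst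
    let cxR := (PySem.List.slice xR none (some spec.2.2)).map Prod.fst
    let cxL := if spec.2.1 == 0 then [] else cxL
    let cxR := if spec.2.2 == 0 then [] else cxR
    feats ++ [(sub, cxL, cxR)]
  else feats

def get_feats (pairs : List (String × String)) : List ((String × String) × List String × List String) :=
  (PySem.List.pyRange 1 ((pairs.length : Int) - 1) 1).foldl
    (fun feats i => featSpecsList.foldl (specStepA pairs i) feats) []

-- ===== PORT B =====
-- body of B's inner 'for (s, lenL, lenR) in _SPECS' loop
def specStepB (pair : String × String) (firsts : List String) (total L mid : Int)
    (fs : List ((String × String) × List String × List String))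
    (spec : Int × Int × Int) : List ((String × String) × List String × List String) :=
  if L ≥ spec.2.1 ∧ total - mid ≥ spec.2.2 then
    fs ++ [(pair, PySem.List.slice firsts (some (L - spec.2.1)) (some L),
                  PySem.List.slice firsts (some mid) (some (mid + spec.2.2)))]
  else fs

def get_feats_alt (pairs : List (String × String)) : List ((String × String) × List String × List String) :=
  let n : Int := pairs.length
  let firsts := (pairs.filter (fun p => p.1 != epsStr)).map Prod.fst
  let total : Int := firsts.length
  let res := (PySem.List.enumerate pairs).foldl
    (fun (st : List ((String × String) × List String × List String) × Int) ip =>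
      let L := st.2
      let mid := L + (if ip.2.1 != epsStr then (1 : Int) else 0)
      let fs := if 1 ≤ ip.1 ∧ ip.1 ≤ n - 2 then
          featSpecsList.foldl (specStepB ip.2 firsts total L mid) st.1
        else st.1
      (fs, mid)) ([], 0)
  res.1

-- ===== PRECONDITION & SPEC =====
def Spec_get_feats (pairs : List (String × String)) (out : List ((String × String) × List String × List String)) : Prop := out = get_feats_alt pairs
instance (pairs : List (String × String)) (out : List ((String × String) × List String × List String)) : Decidable (Spec_get_feats pairs out) := by unfold Spec_get_feats; infer_instance

-- ===== CLAIM (what is proved, stated in full; the proofs are below) =====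
def Claim_equal_get_feats : Prop := ∀ (pairs : List (String × String)), Dom_get_feats pairs → Spec_get_feats pairs (get_feats pairs)

-- ===== LEMMAS AND PROOFS =====

def fNE (p : String × String) : Bool := p.1 != epsStr

def itemA (pairs : List (String × String)) (i : Int) (spec : Int × Int × Int) :
    List ((String × String) × List String × List String) :=
  specStepA pairs i [] spec

def itemB (pair : String × String) (firsts : List String) (total L mid : Int)
    (spec : Int × Int × Int) : List ((String × String) × List String × List String) :=
  specStepB pair firsts total L mid [] spec

def cntNE (pairs : List (String × String)) (j : Nat) : Nat :=
  ((pairs.take j).filter fNE).length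

def dNE (p : String × String) : Int := if p.1 != epsStr then 1 else 0

def bspec (firsts : List String) (total nI : Int) :
    List (String × String) → Int → Int → List ((String × String) × List String × List String)
  | [], _, _ => []
  | p :: rest, k, L =>
    (if 1 ≤ k ∧ k ≤ nI - 2 then featSpecsList.flatMap (itemB p firsts total L (L + dNE p)) else [])
      ++ bspec firsts total nI rest (k + 1) (L + dNE p)

def guardItem (pairs : List (String × String)) (nI : Int) (i : Int) :
    List ((String × String) × List String × List String) :=
  if 1 ≤ i ∧ i ≤ nI - 2 then featSpecsList.flatMap (itemA pairs i) else []

theorem stepA_append (pairs : List (String × String)) (i : Int)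
    (feats : List ((String × String) × List String × List String)) (spec : Int × Int × Int) :
    specStepA pairs i feats spec = feats ++ itemA pairs i spec := by
  simp only [itemA, specStepA]
  split <;> simp

theorem stepB_append (pair : String × String) (firsts : List String) (total L mid : Int)
    (fs : List ((String × String) × List String × List String)) (spec : Int × Int × Int) :
    specStepB pair firsts total L mid fs spec = fs ++ itemB pair firsts total L mid spec := by
  simp only [itemB, specStepB]
  split <;> simp

theorem foldlA_flat (pairs : List (String × String)) (i : Int)
    (feats : List ((String × String) × List String × List String)) :
    featSpecsList.foldl (specStepA pairs i) feats
      = feats ++ featSpecsList.flatMap (itemA pairs i) := by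
  rw [PySem.List.foldl_congr_mem featSpecsList (specStepA pairs i)
        (fun acc s => acc ++ itemA pairs i s) feats
        (by intro acc x _; exact stepA_append pairs i acc x)]
  exact PySem.List.foldl_append_eq_flatMap _ _ _

theorem foldlB_flat (pair : String × String) (firsts : List String) (total L mid : Int)
    (fs : List ((String × String) × List String × List String)) :
    featSpecsList.foldl (specStepB pair firsts total L mid) fs
      = fs ++ featSpecsList.flatMap (itemB pair firsts total L mid) := by
  rw [PySem.List.foldl_congr_mem featSpecsList (specStepB pair firsts total L mid)
        (fun acc s => acc ++ itemB pair firsts total L mid s) fs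
        (by intro acc x _; exact stepB_append pair firsts total L mid acc x)]
  exact PySem.List.foldl_append_eq_flatMap _ _ _

theorem getfeats_eq (pairs : List (String × String)) :
    get_feats pairs
      = (PySem.List.pyRange 1 ((pairs.length : Int) - 1) 1).flatMap
          (fun i => featSpecsList.flatMap (itemA pairs i)) := by
  unfold get_feats
  rw [PySem.List.foldl_congr_mem _ _
        (fun feats i => feats ++ featSpecsList.flatMap (itemA pairs i)) []
        (by intro acc x _; exact foldlA_flat pairs x acc)]
  simpa using PySem.List.foldl_append_eq_flatMap
    (fun i => featSpecsList.flatMap (itemA pairs i))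
    (PySem.List.pyRange 1 ((pairs.length : Int) - 1) 1) []

theorem fold_enum (firsts : List String) (total nI : Int) :
    ∀ (l : List (String × String)) (k : Int)
      (acc : List ((String × String) × List String × List String)) (L0 : Int),
    ((PySem.List.enumerate l k).foldl
      (fun (st : List ((String × String) × List String × List String) × Int) ip =>
        let L := st.2
        let mid := L + (if ip.2.1 != epsStr then (1 : Int) else 0)
        let fs := if 1 ≤ ip.1 ∧ ip.1 ≤ nI - 2 then
            featSpecsList.foldl (specStepB ip.2 firsts total L mid) st.1
          else st.1
        (fs, mid)) (acc, L0)).1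
    = acc ++ bspec firsts total nI l k L0 := by
  intro l
  induction l with
  | nil => intro k acc L0; simp [PySem.List.enumerate_nil, bspec]
  | cons p rest ih =>
    intro k acc L0
    rw [PySem.List.enumerate_cons]
    simp only [List.foldl_cons]
    rw [ih]
    conv_rhs => rw [bspec]
    by_cases h : 1 ≤ k ∧ k ≤ nI - 2
    · simp only [h, dNE, foldlB_flat]
      simp [List.append_assoc]
    · simp [h, dNE]

theorem alt_eq (pairs : List (String × String)) :
    get_feats_alt pairs
      = bspec ((pairs.filter (fun p => p.1 != epsStr)).map Prod.fst)
          (((pairs.filter (fun p => p.1 != epsStr)).map Prod.fst).length : Int)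
          (pairs.length : Int) pairs 0 0 := by
  unfold get_feats_alt
  rw [fold_enum]
  simp

theorem filter_take_prefix (pairs : List (String × String)) (j : Nat) :
    (pairs.take j).filter fNE = (pairs.filter fNE).take (cntNE pairs j) := by
  have h := List.take_left (l₁ := (pairs.take j).filter fNE) (l₂ := (pairs.drop j).filter fNE)
  rw [← List.filter_append, List.take_append_drop] at h
  exact h.symm

theorem filter_drop_suffix (pairs : List (String × String)) (j : Nat) :
    (pairs.drop j).filter fNE = (pairs.filter fNE).drop (cntNE pairs j) := by
  have h := List.drop_left (l₁ := (pairs.take j).filter fNE) (l₂ := (pairs.drop j).filter fNE)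
  rw [← List.filter_append, List.take_append_drop] at h
  exact h.symm

theorem cnt_le (pairs : List (String × String)) (j : Nat) :
    cntNE pairs j ≤ (pairs.filter fNE).length := by
  have h := congrArg List.length (filter_take_prefix pairs j)
  simp only [List.length_take] at h
  have : ((pairs.take j).filter fNE).length = cntNE pairs j := rfl
  omega

theorem cnt_succ (pairs : List (String × String)) (j : Nat) (h : j < pairs.length) :
    (cntNE pairs (j + 1) : Int) = (cntNE pairs j : Int) + dNE pairs[j] := by
  have ht : pairs.take (j + 1) = pairs.take j ++ [pairs[j]] := by
    rw [List.take_add_one, List.getElem?_eq_getElem h]; rfl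
  unfold cntNE dNE
  rw [ht, List.filter_append]
  by_cases hb : pairs[j].1 = epsStr
  · have hf : fNE pairs[j] = false := by simp [fNE, hb]
    simp [hf, hb]
  · have hf : fNE pairs[j] = true := by simp [fNE, hb]
    simp [hf, hb]

theorem crux (pairs : List (String × String)) (j : Nat) (s : Int) (lenL lenR : Nat)
    (h1 : 1 ≤ j) (h2 : j + 2 ≤ pairs.length) :
    itemB (pairs[j]'(by omega)) ((pairs.filter (fun p => p.1 != epsStr)).map Prod.fst)
        (((pairs.filter (fun p => p.1 != epsStr)).map Prod.fst).length : Int)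
        (cntNE pairs j) (cntNE pairs (j + 1)) (s, (lenL : Int), (lenR : Int))
      = itemA pairs (j : Int) (s, (lenL : Int), (lenR : Int)) := by
  have hjlt : j < pairs.length := by omega
  have hfn : (fun p : String × String => p.1 != epsStr) = fNE := rfl
  have hcast1 : ((j : Int) + 1) = ((j + 1 : Nat) : Int) := by push_cast; ring
  simp only [itemA, itemB, specStepA, specStepB, hfn, hcast1,
    PySem.List.slice_to_natCast, PySem.List.slice_from_natCast]
  have hsub : PySem.List.pyGetD pairs (j : Int) ("", "") = pairs[j]'hjlt := by
    rw [PySem.List.pyGetD_natCast]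
    exact List.getD_eq_getElem pairs ("", "") hjlt
  rw [hsub]
  have htake := filter_take_prefix pairs j
  have hdropp := filter_drop_suffix pairs (j + 1)
  have hlenxL : ((pairs.take j).filter fNE).length = cntNE pairs j := rfl
  have hc1 : cntNE pairs j ≤ (pairs.filter fNE).length := cnt_le pairs j
  have hc2 : cntNE pairs (j + 1) ≤ (pairs.filter fNE).length := cnt_le pairs (j + 1)
  have hlenxR : ((pairs.drop (j + 1)).filter fNE).length
      = (pairs.filter fNE).length - cntNE pairs (j + 1) := by
    rw [hdropp, List.length_drop]
  have hmap : ((pairs.filter fNE).map Prod.fst).length = (pairs.filter fNE).length :=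
    List.length_map _
  -- make the two guard conditions syntactically identical
  rw [hlenxL, hlenxR, hmap, Int.natCast_sub hc2]
  by_cases hcond : ((cntNE pairs j : Int) ≥ (lenL : Int)
      ∧ ((pairs.filter fNE).length : Int) - (cntNE pairs (j + 1) : Int) ≥ (lenR : Int))
  · rw [if_pos hcond, if_pos hcond]
    obtain ⟨hcL, hcR⟩ := hcond
    have hLn : lenL ≤ cntNE pairs j := by exact_mod_cast hcL
    have harith : cntNE pairs j - (cntNE pairs j - lenL) = lenL := by omega
    have eL : PySem.List.slice ((pairs.filter fNE).map Prod.fst)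
          (some ((cntNE pairs j : Int) - (lenL : Int))) (some (cntNE pairs j : Int))
        = (if ((lenL : Int) == 0) then [] else
            (PySem.List.slice ((pairs.take j).filter fNE) (some (-(lenL : Int))) none).map Prod.fst) := by
      rcases Nat.eq_zero_or_pos lenL with h0 | hpos
      · subst h0
        simp [PySem.List.slice_natCast]
      · have hne : (((lenL : Nat) : Int) == 0) = false := by simp; omega
        rw [hne]
        simp only [Bool.false_eq_true, if_false]
        rw [← Int.natCast_sub hLn, PySem.List.slice_natCast, harith]
        rw [PySem.List.slice_from_neg_natCast _ _ hpos, hlenxL, htake, List.drop_take, harith,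
          List.map_take, List.map_drop]
    have eR : PySem.List.slice ((pairs.filter fNE).map Prod.fst)
          (some (cntNE pairs (j + 1) : Int))
          (some ((cntNE pairs (j + 1) : Int) + (lenR : Int)))
        = (if ((lenR : Int) == 0) then [] else
            ((pairs.drop (j + 1)).filter fNE).take lenR |>.map Prod.fst) := by
      rcases Nat.eq_zero_or_pos lenR with h0 | hpos
      · subst h0
        simp [PySem.List.slice_natCast]
      · have hne : (((lenR : Nat) : Int) == 0) = false := by simp; omega
        rw [hne]
        simp only [Bool.false_eq_true, if_false]
        rw [PySem.List.slice_natCast_add, hdropp, List.map_take, List.map_drop]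
    rw [eL, eR]
  · rw [if_neg hcond, if_neg hcond]

theorem flatMap_congr_mem {α β : Type} (l : List α) (f g : α → List β)
    (h : ∀ x ∈ l, f x = g x) : l.flatMap f = l.flatMap g := by
  induction l with
  | nil => rfl
  | cons a l ih =>
    simp only [List.flatMap_cons]
    rw [h a (by simp), ih (fun x hx => h x (by simp [hx]))]

theorem bridge (pairs : List (String × String)) :
    ∀ (l : List (String × String)) (j : Nat), pairs.drop j = l →
    bspec ((pairs.filter (fun p => p.1 != epsStr)).map Prod.fst)
        (((pairs.filter (fun p => p.1 != epsStr)).map Prod.fst).length : Int)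
        (pairs.length : Int) l (j : Int) (cntNE pairs j)
      = (PySem.List.pyRange (j : Int) (pairs.length : Int) 1).flatMap
          (guardItem pairs (pairs.length : Int)) := by
  intro l
  induction l with
  | nil =>
    intro j hj
    have hlen : pairs.length ≤ j := by
      have := congrArg List.length hj; simp at this; omega
    rw [PySem.List.pyRange_one_eq_nil (by exact_mod_cast hlen)]
    simp [bspec]
  | cons p rest ih =>
    intro j hj
    have hjlt : j < pairs.length := by
      have := congrArg List.length hj; simp at this; omega
    have hp : pairs[j]'hjlt = p := by
      have h0 : (pairs.drop j)[0]'(by rw [hj]; simp) = p := by simp [hj]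
      simpa using h0
    have hrest : pairs.drop (j + 1) = rest := by
      rw [← List.tail_drop, hj]; rfl
    rw [PySem.List.pyRange_one_cons (by exact_mod_cast hjlt)]
    rw [List.flatMap_cons]
    rw [bspec]
    have hmid : (cntNE pairs j : Int) + dNE p = (cntNE pairs (j + 1) : Int) := by
      rw [cnt_succ pairs j hjlt, hp]
    rw [hmid]
    have hcast : ((j : Int) + 1) = ((j + 1 : Nat) : Int) := by push_cast; ring
    rw [hcast, ih (j + 1) hrest]
    congr 1
    unfold guardItem
    by_cases hg : 1 ≤ (j : Int) ∧ (j : Int) ≤ (pairs.length : Int) - 2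
    · rw [if_pos hg, if_pos hg]
      have h1' : 1 ≤ j := by omega
      have h2 : j + 2 ≤ pairs.length := by omega
      subst hp
      refine flatMap_congr_mem _ _ _ ?_
      intro spec hspec
      fin_cases hspec
      · simpa using crux pairs j 1 0 0 h1' h2
      · simpa using crux pairs j 1 1 0 h1' h2
      · simpa using crux pairs j 1 1 1 h1' h2
      · simpa using crux pairs j 1 1 2 h1' h2
    · rw [if_neg hg, if_neg hg]

theorem main_eq (pairs : List (String × String)) :
    get_feats pairs = get_feats_alt pairs := by
  rw [getfeats_eq, alt_eq]
  have hb := bridge pairs pairs 0 (by simp)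
  have hc0 : cntNE pairs 0 = 0 := by simp [cntNE]
  rw [hc0] at hb
  push_cast at hb
  rw [hb]
  by_cases hsmall : (pairs.length : Int) ≤ 2
  · rw [PySem.List.pyRange_one_eq_nil (by omega)]
    have hz : (PySem.List.pyRange 0 (pairs.length : Int) 1).flatMap
        (guardItem pairs (pairs.length : Int)) = [] := by
      rw [flatMap_congr_mem _ _ (fun _ => ([] : List _)) (by
        intro x hx
        rw [PySem.List.mem_pyRange_one] at hx
        unfold guardItem
        rw [if_neg (by omega)])]
      simp
    rw [hz]
    simp
  · replace hsmall : 2 < (pairs.length : Int) := by omega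
    have hA : PySem.List.pyRange 0 (pairs.length : Int) 1
        = PySem.List.pyRange 0 1 1 ++ PySem.List.pyRange 1 ((pairs.length : Int) - 1) 1
          ++ PySem.List.pyRange ((pairs.length : Int) - 1) (pairs.length : Int) 1 := by
      rw [← PySem.List.pyRange_one_append 0 1 ((pairs.length : Int) - 1) (by omega) (by omega)]
      rw [← PySem.List.pyRange_one_append 0 ((pairs.length : Int) - 1) (pairs.length : Int)
            (by omega) (by omega)]
    rw [hA]
    simp only [List.flatMap_append]
    have h0 : PySem.List.pyRange (0 : Int) 1 1 = [0] := by
      simpa using PySem.List.pyRange_one_singleton (0 : Int)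
    have hn : PySem.List.pyRange ((pairs.length : Int) - 1) (pairs.length : Int) 1
        = [(pairs.length : Int) - 1] := by
      have h := PySem.List.pyRange_one_singleton ((pairs.length : Int) - 1)
      have : (pairs.length : Int) - 1 + 1 = (pairs.length : Int) := by ring
      rwa [this] at h
    rw [h0, hn]
    have g0 : guardItem pairs (pairs.length : Int) 0 = [] := by
      unfold guardItem; rw [if_neg (by omega)]
    have gn : guardItem pairs (pairs.length : Int) ((pairs.length : Int) - 1) = [] := by
      unfold guardItem; rw [if_neg (by omega)]
    simp only [List.flatMap_cons, List.flatMap_nil, g0, gn, List.append_nil, List.nil_append]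
    exact (flatMap_congr_mem _ _ _ (by
      intro x hx
      rw [PySem.List.mem_pyRange_one] at hx
      unfold guardItem
      rw [if_pos (by omega)])).symm

-- ===== VERDICT (by name: the statement is the Claim_ definition above) =====
theorem get_feats_spec : Claim_equal_get_feats := by
  intro pairs _
  unfold Spec_get_feats
  exact main_eq pairs
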